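-- pv_equiv track=rewrite | github.com/DzikowskiW/AoC | aoc2022/23.py | posToCheck
-- ===== SOURCE A (Python) =====
-- def posToCheck(elf, elves, dir):
--     n = (elf[0]-1, elf[1])
--     ne = (elf[0]-1, elf[1]+1)
--     nw = (elf[0]-1, elf[1]-1)
--
--     e = (elf[0], elf[1]+1)
--     w = (elf[0], elf[1]-1)
--
--     s = (elf[0]+1, elf[1])
--     se = (elf[0]+1, elf[1]+1)
--     sw = (elf[0]+1, elf[1]-1)
--
--     if not any(pos in elves for pos in [n, ne, nw, e, w, s, se, sw]):
--         return elf
--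
--     if dir == 'N':
--         if not (n in elves or ne in elves or nw in elves):
--             return n
--     elif dir == 'S':
--         if not (s in elves or se in elves or sw in elves):
--             return s
--     elif dir == 'W':
--         if not (w in elves or sw in elves or nw in elves):
--             return w
--     elif dir == 'E':
--         if not (e in elves or se in elves or ne in elves):
--             return e
--     return None
-- ===== SOURCE B (Python) =====
-- def posToCheck(elf, elves, dir):
--     r, c = elf
--     # one pass over elves: bit 3*(dr+1)+(dc+1) set iff neighbour offset (dr,dc) occupied
--     mask = 0
--     for (x, y) in elves:
--         dr, dc = x - r, y - c
--         if -1 <= dr <= 1 and -1 <= dc <= 1 and (dr or dc):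
--             mask |= 1 << (3 * (dr + 1) + (dc + 1))
--     if mask == 0:
--         return elf
--     tests = {'N': (0b000000111, (r - 1, c)),
--              'S': (0b111000000, (r + 1, c)),
--              'W': (0b001001001, (r, c - 1)),
--              'E': (0b100100100, (r, c + 1))}
--     t = tests.get(dir)
--     if t is not None and mask & t[0] == 0:
--         return t[1]
--     return None
-- ===== Notes on version B (the rewrite author's own statement) =====
-- stated objective: alternative
-- what changed: B inverts the data flow: instead of A's eight membership scans of elves (one per candidate neighbour cell), B makes a single pass over elves accumulating a 9-bit occupancy bitmask of neighbour offsets, then decides the early return and the per-direction test by constant bitmask operations.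
import Mathlib
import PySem

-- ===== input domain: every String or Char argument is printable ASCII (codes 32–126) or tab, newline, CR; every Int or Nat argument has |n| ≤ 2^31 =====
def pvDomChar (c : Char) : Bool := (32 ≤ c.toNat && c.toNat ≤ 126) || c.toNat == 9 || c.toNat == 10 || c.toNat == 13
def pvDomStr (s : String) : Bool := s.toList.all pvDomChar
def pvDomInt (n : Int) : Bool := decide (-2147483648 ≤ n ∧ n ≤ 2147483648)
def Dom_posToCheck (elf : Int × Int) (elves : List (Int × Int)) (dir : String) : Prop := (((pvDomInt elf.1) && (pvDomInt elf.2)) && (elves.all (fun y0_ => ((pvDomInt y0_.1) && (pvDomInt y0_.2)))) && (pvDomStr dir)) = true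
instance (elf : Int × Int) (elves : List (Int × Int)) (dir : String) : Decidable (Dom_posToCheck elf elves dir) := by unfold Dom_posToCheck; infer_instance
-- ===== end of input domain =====

-- B inverts the data flow: one pass over elves builds a 9-bit neighbour-occupancy bitmask
-- (A instead scans elves once per candidate cell); return value proved equal on all inputs.

-- ===== PORT A =====
def posToCheck (elf : Int × Int) (elves : List (Int × Int)) (dir : String) : Option (Int × Int) :=
  let n := (elf.1 - 1, elf.2)
  let ne := (elf.1 - 1, elf.2 + 1)
  let nw := (elf.1 - 1, elf.2 - 1)
  let e := (elf.1, elf.2 + 1)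
  let w := (elf.1, elf.2 - 1)
  let s := (elf.1 + 1, elf.2)
  let se := (elf.1 + 1, elf.2 + 1)
  let sw := (elf.1 + 1, elf.2 - 1)
  if ¬ (([n, ne, nw, e, w, s, se, sw].any (fun pos => elves.contains pos)) = true) then
    some elf
  else if dir == "N" then
    (if ¬ ((elves.contains n || elves.contains ne || elves.contains nw) = true) then some n else none)
  else if dir == "S" then
    (if ¬ ((elves.contains s || elves.contains se || elves.contains sw) = true) then some s else none)
  else if dir == "W" then
    (if ¬ ((elves.contains w || elves.contains sw || elves.contains nw) = true) then some w else none)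
  else if dir == "E" then
    (if ¬ ((elves.contains e || elves.contains se || elves.contains ne) = true) then some e else none)
  else none

-- ===== PORT B =====
-- the loop body: `if -1 <= dr <= 1 and -1 <= dc <= 1 and (dr or dc): mask |= 1 << (3*(dr+1)+(dc+1))`
-- (the shift amount is a nonnegative int, so `.toNat` is exact here)
def nbrStep (r c : Int) (mask : Nat) (p : Int × Int) : Nat :=
  if (-1 ≤ p.1 - r ∧ p.1 - r ≤ 1) ∧ (-1 ≤ p.2 - c ∧ p.2 - c ≤ 1) ∧ ¬(p.1 - r = 0 ∧ p.2 - c = 0) then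
    mask ||| (1 <<< (3 * (p.1 - r + 1) + (p.2 - c + 1)).toNat)
  else mask

def nbrMask (r c : Int) (elves : List (Int × Int)) : Nat :=
  elves.foldl (nbrStep r c) 0

def posToCheck_alt (elf : Int × Int) (elves : List (Int × Int)) (dir : String) : Option (Int × Int) :=
  let r := elf.1
  let c := elf.2
  let mask := nbrMask r c elves
  if mask = 0 then some elf
  else
    let tests : PySem.Dict String (Nat × (Int × Int)) :=
      PySem.Dict.ofList
        [("N", (7, (r - 1, c))), ("S", (448, (r + 1, c))),
         ("W", (73, (r, c - 1))), ("E", (292, (r, c + 1)))]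
    match tests.get? dir with
    | some t => if mask &&& t.1 = 0 then some t.2 else none
    | none => none

-- ===== PRECONDITION & SPEC =====
def Spec_posToCheck (elf : Int × Int) (elves : List (Int × Int)) (dir : String) (out : Option (Int × Int)) : Prop := out = posToCheck_alt elf elves dir
instance (elf : Int × Int) (elves : List (Int × Int)) (dir : String) (out : Option (Int × Int)) : Decidable (Spec_posToCheck elf elves dir out) := by unfold Spec_posToCheck; infer_instance

-- ===== CLAIM (what is proved, stated in full; the proofs are below) =====
def Claim_equal_posToCheck : Prop := ∀ (elf : Int × Int) (elves : List (Int × Int)) (dir : String), Dom_posToCheck elf elves dir → Spec_posToCheck elf elves dir (posToCheck elf elves dir)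

-- ===== LEMMAS AND PROOFS =====

theorem testBit_foldl_hit (r c dr dc : Int) (h1 : -1 ≤ dr) (h2 : dr ≤ 1) (h3 : -1 ≤ dc)
    (h4 : dc ≤ 1) (h5 : ¬(dr = 0 ∧ dc = 0)) :
    ∀ (l : List (Int × Int)) (a : Nat),
      (l.foldl (nbrStep r c) a).testBit (3 * (dr + 1) + (dc + 1)).toNat
        = (a.testBit (3 * (dr + 1) + (dc + 1)).toNat || l.contains (r + dr, c + dc))
  | [], a => by simp
  | p :: t, a => by
    rw [List.foldl_cons, testBit_foldl_hit r c dr dc h1 h2 h3 h4 h5 t, List.contains_cons]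
    have hstep : (nbrStep r c a p).testBit (3 * (dr + 1) + (dc + 1)).toNat
        = (a.testBit (3 * (dr + 1) + (dc + 1)).toNat || ((r + dr, c + dc) == p)) := by
      unfold nbrStep
      split
      · rename_i hc
        obtain ⟨⟨hp1, hp2⟩, ⟨hp3, hp4⟩, hp5⟩ := hc
        rw [Nat.testBit_or, Nat.shiftLeft_eq, one_mul]
        by_cases hp : p.1 = r + dr ∧ p.2 = c + dc
        · have hidx : (3 * (p.1 - r + 1) + (p.2 - c + 1)).toNat
              = (3 * (dr + 1) + (dc + 1)).toNat := by omega
          have hbeq : ((r + dr, c + dc) == p) = true := by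
            obtain ⟨x, y⟩ := p
            simp only at hp
            simp only [beq_iff_eq, Prod.mk.injEq]
            exact ⟨hp.1.symm, hp.2.symm⟩
          rw [hidx, Nat.testBit_two_pow_self, hbeq]
        · have hidx : (3 * (p.1 - r + 1) + (p.2 - c + 1)).toNat
              ≠ (3 * (dr + 1) + (dc + 1)).toNat := by
            obtain ⟨x, y⟩ := p; simp only at hp1 hp2 hp3 hp4 hp5 hp
            omega
          have hbeq : ((r + dr, c + dc) == p) = false := by
            obtain ⟨x, y⟩ := p
            simp only [beq_eq_false_iff_ne, ne_eq, Prod.mk.injEq, not_and]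
            intro hx hy; exact absurd ⟨by omega, by omega⟩ hp
          rw [Nat.testBit_two_pow_of_ne hidx, hbeq, Bool.or_false]
      · rename_i hc
        have hbeq : ((r + dr, c + dc) == p) = false := by
          obtain ⟨x, y⟩ := p
          simp only [beq_eq_false_iff_ne, ne_eq, Prod.mk.injEq, not_and]
          intro hx hy
          exact hc ⟨⟨by omega, by omega⟩, ⟨by omega, by omega⟩, by omega⟩
        rw [hbeq, Bool.or_false]
    rw [hstep, Bool.or_assoc, Bool.or_comm (((r + dr, c + dc) == p)) _, ← Bool.or_assoc]

theorem testBit_foldl_miss (r c : Int) (k : Nat) (hk : k = 4 ∨ 9 ≤ k) :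
    ∀ (l : List (Int × Int)) (a : Nat),
      (l.foldl (nbrStep r c) a).testBit k = a.testBit k
  | [], a => rfl
  | p :: t, a => by
    rw [List.foldl_cons, testBit_foldl_miss r c k hk t]
    unfold nbrStep
    split
    · rename_i hc
      obtain ⟨⟨hp1, hp2⟩, ⟨hp3, hp4⟩, hp5⟩ := hc
      have hidx : (3 * (p.1 - r + 1) + (p.2 - c + 1)).toNat ≠ k := by omega
      rw [Nat.testBit_or, Nat.shiftLeft_eq, one_mul, Nat.testBit_two_pow_of_ne hidx,
        Bool.or_false]
    · rfl

-- the eight meaningful bits of the mask, in cell form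
theorem bit_nw (r c : Int) (elves : List (Int × Int)) :
    (nbrMask r c elves).testBit 0 = elves.contains (r - 1, c - 1) := by
  have h := testBit_foldl_hit r c (-1) (-1) (by norm_num) (by norm_num) (by norm_num)
    (by norm_num) (by norm_num) elves 0
  norm_num [nbrMask, sub_eq_add_neg] at h ⊢
  exact h

theorem bit_n (r c : Int) (elves : List (Int × Int)) :
    (nbrMask r c elves).testBit 1 = elves.contains (r - 1, c) := by
  have h := testBit_foldl_hit r c (-1) 0 (by norm_num) (by norm_num) (by norm_num)
    (by norm_num) (by norm_num) elves 0
  norm_num [nbrMask, sub_eq_add_neg] at h ⊢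
  exact h

theorem bit_ne (r c : Int) (elves : List (Int × Int)) :
    (nbrMask r c elves).testBit 2 = elves.contains (r - 1, c + 1) := by
  have h := testBit_foldl_hit r c (-1) 1 (by norm_num) (by norm_num) (by norm_num)
    (by norm_num) (by norm_num) elves 0
  norm_num [nbrMask, sub_eq_add_neg] at h ⊢
  exact h

theorem bit_w (r c : Int) (elves : List (Int × Int)) :
    (nbrMask r c elves).testBit 3 = elves.contains (r, c - 1) := by
  have h := testBit_foldl_hit r c 0 (-1) (by norm_num) (by norm_num) (by norm_num)
    (by norm_num) (by norm_num) elves 0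
  norm_num [nbrMask, sub_eq_add_neg] at h ⊢
  exact h

theorem bit_e (r c : Int) (elves : List (Int × Int)) :
    (nbrMask r c elves).testBit 5 = elves.contains (r, c + 1) := by
  have h := testBit_foldl_hit r c 0 1 (by norm_num) (by norm_num) (by norm_num)
    (by norm_num) (by norm_num) elves 0
  norm_num [nbrMask] at h ⊢
  exact h

theorem bit_sw (r c : Int) (elves : List (Int × Int)) :
    (nbrMask r c elves).testBit 6 = elves.contains (r + 1, c - 1) := by
  have h := testBit_foldl_hit r c 1 (-1) (by norm_num) (by norm_num) (by norm_num)
    (by norm_num) (by norm_num) elves 0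
  norm_num [nbrMask, sub_eq_add_neg] at h ⊢
  exact h

theorem bit_s (r c : Int) (elves : List (Int × Int)) :
    (nbrMask r c elves).testBit 7 = elves.contains (r + 1, c) := by
  have h := testBit_foldl_hit r c 1 0 (by norm_num) (by norm_num) (by norm_num)
    (by norm_num) (by norm_num) elves 0
  norm_num [nbrMask] at h ⊢
  exact h

theorem bit_se (r c : Int) (elves : List (Int × Int)) :
    (nbrMask r c elves).testBit 8 = elves.contains (r + 1, c + 1) := by
  have h := testBit_foldl_hit r c 1 1 (by norm_num) (by norm_num) (by norm_num)
    (by norm_num) (by norm_num) elves 0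
  norm_num [nbrMask] at h ⊢
  exact h

theorem bit_dead (r c : Int) (elves : List (Int × Int)) (k : Nat) (hk : k = 4 ∨ 9 ≤ k) :
    (nbrMask r c elves).testBit k = false := by
  have h := testBit_foldl_miss r c k hk elves 0
  simpa [nbrMask] using h

theorem mask_zero_iff (r c : Int) (elves : List (Int × Int)) :
    nbrMask r c elves = 0 ↔
      (elves.contains (r - 1, c) = false ∧ elves.contains (r - 1, c + 1) = false ∧
       elves.contains (r - 1, c - 1) = false ∧ elves.contains (r, c + 1) = false ∧
       elves.contains (r, c - 1) = false ∧ elves.contains (r + 1, c) = false ∧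
       elves.contains (r + 1, c + 1) = false ∧ elves.contains (r + 1, c - 1) = false) := by
  constructor
  · intro h
    refine ⟨?_, ?_, ?_, ?_, ?_, ?_, ?_, ?_⟩ <;>
      first
      | (rw [← bit_n r c elves, h]; rfl)
      | (rw [← bit_ne r c elves, h]; rfl)
      | (rw [← bit_nw r c elves, h]; rfl)
      | (rw [← bit_e r c elves, h]; rfl)
      | (rw [← bit_w r c elves, h]; rfl)
      | (rw [← bit_s r c elves, h]; rfl)
      | (rw [← bit_se r c elves, h]; rfl)
      | (rw [← bit_sw r c elves, h]; rfl)
  · intro h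
    obtain ⟨h1, h2, h3, h4, h5, h6, h7, h8⟩ := h
    apply Nat.zero_of_testBit_eq_false
    intro i
    by_cases hi : i = 4 ∨ 9 ≤ i
    · exact bit_dead r c elves i hi
    · have hi9 : i < 9 := by omega
      interval_cases i
      · rw [bit_nw]; exact h3
      · rw [bit_n]; exact h1
      · rw [bit_ne]; exact h2
      · rw [bit_w]; exact h5
      · exact absurd (Or.inl rfl) hi
      · rw [bit_e]; exact h4
      · rw [bit_sw]; exact h8
      · rw [bit_s]; exact h6
      · rw [bit_se]; exact h7

-- generic: (mask &&& T) = 0 iff the three bits of T are clear in mask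
theorem mask_and_eq_zero (m T : Nat) (i1 i2 i3 : Nat)
    (hT : ∀ k : Nat, T.testBit k = (k == i1 || k == i2 || k == i3)) :
    (m &&& T = 0) ↔ (m.testBit i1 = false ∧ m.testBit i2 = false ∧ m.testBit i3 = false) := by
  constructor
  · intro h
    refine ⟨?_, ?_, ?_⟩
    · have := congrArg (fun x => x.testBit i1) h
      simpa [Nat.testBit_land, hT i1] using this
    · have := congrArg (fun x => x.testBit i2) h
      simpa [Nat.testBit_land, hT i2] using this
    · have := congrArg (fun x => x.testBit i3) h
      simpa [Nat.testBit_land, hT i3] using this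
  · intro ⟨g1, g2, g3⟩
    apply Nat.zero_of_testBit_eq_false
    intro k
    rw [Nat.testBit_land, hT k]
    by_cases hk1 : k = i1
    · subst hk1; simp [g1]
    by_cases hk2 : k = i2
    · subst hk2; simp [g2]
    by_cases hk3 : k = i3
    · subst hk3; simp [g3]
    simp [hk1, hk2, hk3]

-- the dispatch dict with variable values still has literal string keys, so it is a literal Dict.mk
theorem tests_eq (r c : Int) :
    (PySem.Dict.ofList
        [("N", ((7 : Nat), (r - 1, c))), ("S", (448, (r + 1, c))),
         ("W", (73, (r, c - 1))), ("E", (292, (r, c + 1)))])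
      = PySem.Dict.mk
        [("N", ((7 : Nat), (r - 1, c))), ("S", (448, (r + 1, c))),
         ("W", (73, (r, c - 1))), ("E", (292, (r, c + 1)))] := rfl

theorem testBit_7 (k : Nat) : (7 : Nat).testBit k = (k == 0 || k == 1 || k == 2) := by
  by_cases h : k < 16
  · interval_cases k <;> decide
  · rw [Nat.testBit_eq_false_of_lt (lt_of_lt_of_le (by norm_num)
      (Nat.pow_le_pow_right (by norm_num) (show 16 ≤ k by omega)))]
    symm; simp; omega

theorem testBit_448 (k : Nat) : (448 : Nat).testBit k = (k == 6 || k == 7 || k == 8) := by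
  by_cases h : k < 16
  · interval_cases k <;> decide
  · rw [Nat.testBit_eq_false_of_lt (lt_of_lt_of_le (by norm_num)
      (Nat.pow_le_pow_right (by norm_num) (show 16 ≤ k by omega)))]
    symm; simp; omega

theorem testBit_73 (k : Nat) : (73 : Nat).testBit k = (k == 0 || k == 3 || k == 6) := by
  by_cases h : k < 16
  · interval_cases k <;> decide
  · rw [Nat.testBit_eq_false_of_lt (lt_of_lt_of_le (by norm_num)
      (Nat.pow_le_pow_right (by norm_num) (show 16 ≤ k by omega)))]
    symm; simp; omega

theorem testBit_292 (k : Nat) : (292 : Nat).testBit k = (k == 2 || k == 5 || k == 8) := by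
  by_cases h : k < 16
  · interval_cases k <;> decide
  · rw [Nat.testBit_eq_false_of_lt (lt_of_lt_of_le (by norm_num)
      (Nat.pow_le_pow_right (by norm_num) (show 16 ≤ k by omega)))]
    symm; simp; omega

theorem mask_and_N (r c : Int) (elves : List (Int × Int)) :
    (nbrMask r c elves &&& 7 = 0) ↔
      (elves.contains (r - 1, c) || elves.contains (r - 1, c + 1) ||
        elves.contains (r - 1, c - 1)) = false := by
  rw [mask_and_eq_zero _ 7 0 1 2 testBit_7, bit_nw, bit_n, bit_ne]
  simp only [Bool.or_eq_false_iff]; tauto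

theorem mask_and_S (r c : Int) (elves : List (Int × Int)) :
    (nbrMask r c elves &&& 448 = 0) ↔
      (elves.contains (r + 1, c) || elves.contains (r + 1, c + 1) ||
        elves.contains (r + 1, c - 1)) = false := by
  rw [mask_and_eq_zero _ 448 6 7 8 testBit_448, bit_sw, bit_s, bit_se]
  simp only [Bool.or_eq_false_iff]; tauto

theorem mask_and_W (r c : Int) (elves : List (Int × Int)) :
    (nbrMask r c elves &&& 73 = 0) ↔
      (elves.contains (r, c - 1) || elves.contains (r + 1, c - 1) ||
        elves.contains (r - 1, c - 1)) = false := by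
  rw [mask_and_eq_zero _ 73 0 3 6 testBit_73, bit_nw, bit_w, bit_sw]
  simp only [Bool.or_eq_false_iff]; tauto

theorem mask_and_E (r c : Int) (elves : List (Int × Int)) :
    (nbrMask r c elves &&& 292 = 0) ↔
      (elves.contains (r, c + 1) || elves.contains (r + 1, c + 1) ||
        elves.contains (r - 1, c + 1)) = false := by
  rw [mask_and_eq_zero _ 292 2 5 8 testBit_292, bit_ne, bit_e, bit_se]
  simp only [Bool.or_eq_false_iff]; tauto

theorem posToCheck_eq (elf : Int × Int) (elves : List (Int × Int)) (dir : String) :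
    posToCheck elf elves dir = posToCheck_alt elf elves dir := by
  obtain ⟨r, c⟩ := elf
  rw [posToCheck, posToCheck_alt]
  simp only []
  by_cases h1 : (([((r : Int) - 1, c), (r - 1, c + 1), (r - 1, c - 1), (r, c + 1), (r, c - 1),
      (r + 1, c), (r + 1, c + 1), (r + 1, c - 1)].any (fun pos => elves.contains pos)) = true)
  · have hmask : ¬ (nbrMask r c elves = 0) := by
      rw [mask_zero_iff]
      intro hall
      obtain ⟨g1, g2, g3, g4, g5, g6, g7, g8⟩ := hall
      simp only [List.any_cons, List.any_nil, Bool.or_false, g1, g2, g3, g4, g5, g6, g7, g8] at h1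
      exact absurd h1 (by simp)
    rw [if_neg (not_not_intro h1), if_neg hmask, tests_eq]
    by_cases hN : dir = "N"
    · subst hN
      simp only [PySem.Dict.get?_mk_cons, beq_self_eq_true, if_true]
      by_cases hc : (elves.contains (r - 1, c) || elves.contains (r - 1, c + 1) ||
          elves.contains (r - 1, c - 1)) = true
      · rw [if_neg (not_not_intro hc), if_neg (by rw [mask_and_N, hc]; simp)]
      · rw [if_pos hc, if_pos (by rw [mask_and_N]; simpa using hc)]
    · have gN : ¬(("N" == dir) = true) := by simp only [beq_iff_eq]; exact fun h => hN h.symm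
      have gN' : ¬((dir == "N") = true) := by simp [hN]
      by_cases hS : dir = "S"
      · subst hS
        rw [if_neg gN']
        simp only [PySem.Dict.get?_mk_cons, if_neg gN, beq_self_eq_true, if_true]
        by_cases hc : (elves.contains (r + 1, c) || elves.contains (r + 1, c + 1) ||
            elves.contains (r + 1, c - 1)) = true
        · rw [if_neg (not_not_intro hc), if_neg (by rw [mask_and_S, hc]; simp)]
        · rw [if_pos hc, if_pos (by rw [mask_and_S]; simpa using hc)]
      · have gS : ¬(("S" == dir) = true) := by simp only [beq_iff_eq]; exact fun h => hS h.symm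
        have gS' : ¬((dir == "S") = true) := by simp [hS]
        by_cases hW : dir = "W"
        · subst hW
          rw [if_neg gN', if_neg gS']
          simp only [PySem.Dict.get?_mk_cons, if_neg gN, if_neg gS,
            beq_self_eq_true, if_true]
          by_cases hc : (elves.contains (r, c - 1) || elves.contains (r + 1, c - 1) ||
              elves.contains (r - 1, c - 1)) = true
          · rw [if_neg (not_not_intro hc), if_neg (by rw [mask_and_W, hc]; simp)]
          · rw [if_pos hc, if_pos (by rw [mask_and_W]; simpa using hc)]
        · have gW : ¬(("W" == dir) = true) := by simp only [beq_iff_eq]; exact fun h => hW h.symm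
          have gW' : ¬((dir == "W") = true) := by simp [hW]
          by_cases hE : dir = "E"
          · subst hE
            rw [if_neg gN', if_neg gS', if_neg gW']
            simp only [PySem.Dict.get?_mk_cons, if_neg gN, if_neg gS,
              if_neg gW, beq_self_eq_true, if_true]
            by_cases hc : (elves.contains (r, c + 1) || elves.contains (r + 1, c + 1) ||
                elves.contains (r - 1, c + 1)) = true
            · rw [if_neg (not_not_intro hc), if_neg (by rw [mask_and_E, hc]; simp)]
            · rw [if_pos hc, if_pos (by rw [mask_and_E]; simpa using hc)]
          · have gE : ¬(("E" == dir) = true) := by simp only [beq_iff_eq]; exact fun h => hE h.symm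
            have gE' : ¬((dir == "E") = true) := by simp [hE]
            rw [if_neg gN', if_neg gS', if_neg gW', if_neg gE']
            simp [PySem.Dict.get?, gN, gS, gW, gE]
  · have hmask : nbrMask r c elves = 0 := by
      rw [mask_zero_iff]
      simp only [List.any_cons, List.any_nil, Bool.or_false, Bool.or_eq_true, not_or] at h1
      refine ⟨?_, ?_, ?_, ?_, ?_, ?_, ?_, ?_⟩ <;> simp_all
    rw [if_pos h1, if_pos hmask]

-- ===== VERDICT (by name: the statement is the Claim_ definition above) =====
theorem posToCheck_spec : Claim_equal_posToCheck := by
  intro elf elves dir _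
  exact posToCheck_eq elf elves dir
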